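-- pv_equiv track=rewrite | github.com/haolinsun0907/QuickSearch | MainWindow.py | boolean_calculate
-- ===== SOURCE A (Python) =====
-- def boolean_calculate(ids1, ids2, operator):
--     answer = []
--     if operator == 'AND':
--         p1 = 0
--         p2 = 0
--         while p1 < len(ids1) and p2 < len(ids2):
--             if ids1[p1] == ids2[p2]:
--                 answer.append(ids1[p1])
--                 p1 += 1
--                 p2 += 1
--             elif ids1[p1] < ids2[p2]:
--                 p1 += 1
--             else:
--                 p2 += 1
--     elif operator == 'OR':
--         p1 = 0
--         p2 = 0
--         while p1 < len(ids1) and p2 < len(ids2):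
--             if ids1[p1] == ids2[p2]:
--                 answer.append(ids1[p1])
--                 p1 += 1
--                 p2 += 1
--             elif ids1[p1] < ids2[p2]:
--                 answer.append(ids1[p1])
--                 p1 += 1
--             else:
--                 answer.append(ids2[p2])
--                 p2 += 1
--
--         while p1 < len(ids1):
--             answer.append(ids1[p1])
--             p1 += 1
--         while p2 < len(ids2):
--             answer.append(ids2[p2])
--             p2 += 1
--     else:
--         p1 = 0
--         p2 = 0
--         while p1 < len(ids1) and p2 < len(ids2):
--             if ids1[p1] == ids2[p2]:
--                 p1 += 1
--                 p2 += 1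
--             elif ids1[p1] < ids2[p2]:
--                 p1 += 1
--             else:
--                 answer.append(ids2[p2])
--                 p2 += 1
--         while p2 < len(ids2):
--             answer.append(ids2[p2])
--             p2 += 1
--     return answer
-- ===== SOURCE B (Python) =====
-- def boolean_calculate(ids1, ids2, operator):
--     # one operator-independent pass: classify each merge step, remember the leftovers
--     events = []
--     p1 = 0
--     p2 = 0
--     while p1 < len(ids1) and p2 < len(ids2):
--         x, y = ids1[p1], ids2[p2]
--         if x == y:
--             events.append(('b', x))
--             p1 += 1
--             p2 += 1
--         elif x < y:
--             events.append(('l', x))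
--             p1 += 1
--         else:
--             events.append(('r', y))
--             p2 += 1
--     rest1 = ids1[p1:]
--     rest2 = ids2[p2:]
--     # declarative selection per operator
--     if operator == 'AND':
--         return [v for t, v in events if t == 'b']
--     if operator == 'OR':
--         return [v for t, v in events] + rest1 + rest2
--     return [v for t, v in events if t == 'r'] + rest2
-- ===== Notes on version B (the rewrite author's own statement) =====
-- stated objective: alternative
-- what changed: Replaces A's three specialized two-pointer loops by a single operator-independent tagged-merge pass (classifying every step as both/left-only/right-only and keeping the two leftovers) followed by a declarative per-operator selection of the tagged events.
import Mathlib
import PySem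

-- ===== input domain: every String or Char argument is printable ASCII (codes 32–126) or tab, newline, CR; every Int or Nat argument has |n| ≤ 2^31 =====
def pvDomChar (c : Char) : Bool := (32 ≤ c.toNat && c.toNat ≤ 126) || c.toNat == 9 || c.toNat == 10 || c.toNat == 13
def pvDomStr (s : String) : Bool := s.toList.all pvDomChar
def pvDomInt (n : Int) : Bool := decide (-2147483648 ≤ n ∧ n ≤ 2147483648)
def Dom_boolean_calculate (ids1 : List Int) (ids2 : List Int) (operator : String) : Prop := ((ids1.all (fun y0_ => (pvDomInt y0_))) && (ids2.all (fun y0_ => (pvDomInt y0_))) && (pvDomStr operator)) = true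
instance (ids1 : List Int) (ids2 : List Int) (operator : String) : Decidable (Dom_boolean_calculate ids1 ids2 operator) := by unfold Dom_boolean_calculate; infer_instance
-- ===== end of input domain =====

-- B replaces A's three specialized two-pointer loops by one operator-independent tagged-merge
-- pass plus a declarative per-operator selection; equal to A on every input (objective: alternative).


-- ===== PORT A =====
-- each while loop over the pointers p1, p2 becomes the obvious recursion on the two suffixes
def andLoop : List Int → List Int → List Int
  | x :: xs, y :: ys =>
    if x = y then x :: andLoop xs ys
    else if x < y then andLoop xs (y :: ys)
    else andLoop (x :: xs) ys
  | _, _ => []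
termination_by xs ys => xs.length + ys.length

def orLoop : List Int → List Int → List Int
  | x :: xs, y :: ys =>
    if x = y then x :: orLoop xs ys
    else if x < y then x :: orLoop xs (y :: ys)
    else y :: orLoop (x :: xs) ys
  | xs, [] => xs          -- drain of ids1 after the main loop
  | [], ys => ys          -- drain of ids2 after the main loop
termination_by xs ys => xs.length + ys.length

def diffLoop : List Int → List Int → List Int
  | x :: xs, y :: ys =>
    if x = y then diffLoop xs ys
    else if x < y then diffLoop xs (y :: ys)
    else y :: diffLoop (x :: xs) ys
  | [], ys => ys          -- drain of ids2 after the main loop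
  | _, [] => []
termination_by xs ys => xs.length + ys.length

def boolean_calculate (ids1 : List Int) (ids2 : List Int) (operator : String) : List Int :=
  if operator = "AND" then andLoop ids1 ids2
  else if operator = "OR" then orLoop ids1 ids2
  else diffLoop ids1 ids2

-- ===== PORT B =====
-- the operator-independent classification pass: tagged events plus the two leftover suffixes
def bcWalk : List Int → List Int → List (String × Int) × List Int × List Int
  | x :: xs, y :: ys =>
    if x = y then
      let r := bcWalk xs ys
      (("b", x) :: r.1, r.2)
    else if x < y then
      let r := bcWalk xs (y :: ys)
      (("l", x) :: r.1, r.2)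
    else
      let r := bcWalk (x :: xs) ys
      (("r", y) :: r.1, r.2)
  | xs, ys => ([], xs, ys)
termination_by xs ys => xs.length + ys.length

def boolean_calculate_alt (ids1 : List Int) (ids2 : List Int) (operator : String) : List Int :=
  let w := bcWalk ids1 ids2
  if operator = "AND" then
    (w.1.filter (fun tv => tv.1 == "b")).map (fun tv => tv.2)
  else if operator = "OR" then
    w.1.map (fun tv => tv.2) ++ w.2.1 ++ w.2.2
  else
    (w.1.filter (fun tv => tv.1 == "r")).map (fun tv => tv.2) ++ w.2.2

-- ===== PRECONDITION & SPEC =====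
def Spec_boolean_calculate (ids1 : List Int) (ids2 : List Int) (operator : String) (out : List Int) : Prop := out = boolean_calculate_alt ids1 ids2 operator
instance (ids1 : List Int) (ids2 : List Int) (operator : String) (out : List Int) : Decidable (Spec_boolean_calculate ids1 ids2 operator out) := by unfold Spec_boolean_calculate; infer_instance

-- ===== CLAIM (what is proved, stated in full; the proofs are below) =====
def Claim_equal_boolean_calculate : Prop := ∀ (ids1 : List Int) (ids2 : List Int) (operator : String), Dom_boolean_calculate ids1 ids2 operator → Spec_boolean_calculate ids1 ids2 operator (boolean_calculate ids1 ids2 operator)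

-- ===== LEMMAS AND PROOFS =====

lemma bcWalk_base {xs ys : List Int}
    (h : ∀ (x : Int) (xs' : List Int) (y : Int) (ys' : List Int), xs = x :: xs' → ys = y :: ys' → False) :
    bcWalk xs ys = ([], xs, ys) := by
  rw [bcWalk.eq_def]
  rcases xs with _ | ⟨x, xs⟩
  · rcases ys <;> rfl
  · rcases ys with _ | ⟨y, ys⟩
    · rfl
    · exact (h x xs y ys rfl rfl).elim

lemma andLoop_eq_walk (xs ys : List Int) :
    andLoop xs ys = ((bcWalk xs ys).1.filter (fun tv => tv.1 == "b")).map (fun tv => tv.2) := by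
  induction xs, ys using bcWalk.induct with
  | case1 xs y ys ih =>
    rw [andLoop, if_pos rfl, bcWalk, if_pos rfl]
    simp [ih]
  | case2 x xs y ys heq hlt ih =>
    rw [andLoop, if_neg heq, if_pos hlt, bcWalk, if_neg heq, if_pos hlt]
    simpa using ih
  | case3 x xs y ys heq hlt ih =>
    rw [andLoop, if_neg heq, if_neg hlt, bcWalk, if_neg heq, if_neg hlt]
    simpa using ih
  | case4 xs ys hne =>
    rw [bcWalk_base hne]
    rcases xs with _ | ⟨x, xs⟩
    · rw [andLoop.eq_def]; rcases ys <;> rfl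
    · rcases ys with _ | ⟨y, ys⟩
      · rw [andLoop.eq_def]; rcases xs <;> rfl
      · exact (hne x xs y ys rfl rfl).elim

lemma orLoop_eq_walk (xs ys : List Int) :
    orLoop xs ys = (bcWalk xs ys).1.map (fun tv => tv.2) ++ (bcWalk xs ys).2.1 ++ (bcWalk xs ys).2.2 := by
  induction xs, ys using bcWalk.induct with
  | case1 xs y ys ih =>
    rw [orLoop, if_pos rfl, bcWalk, if_pos rfl]
    simp [ih]
  | case2 x xs y ys heq hlt ih =>
    rw [orLoop, if_neg heq, if_pos hlt, bcWalk, if_neg heq, if_pos hlt]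
    simp [ih]
  | case3 x xs y ys heq hlt ih =>
    rw [orLoop, if_neg heq, if_neg hlt, bcWalk, if_neg heq, if_neg hlt]
    simp [ih]
  | case4 xs ys hne =>
    rw [bcWalk_base hne]
    rcases xs with _ | ⟨x, xs⟩
    · rw [orLoop.eq_def]; rcases ys <;> rfl
    · rcases ys with _ | ⟨y, ys⟩
      · rw [orLoop.eq_def]; simp
      · exact (hne x xs y ys rfl rfl).elim

lemma diffLoop_eq_walk (xs ys : List Int) :
    diffLoop xs ys = ((bcWalk xs ys).1.filter (fun tv => tv.1 == "r")).map (fun tv => tv.2) ++ (bcWalk xs ys).2.2 := by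
  induction xs, ys using bcWalk.induct with
  | case1 xs y ys ih =>
    rw [diffLoop, if_pos rfl, bcWalk, if_pos rfl]
    simpa using ih
  | case2 x xs y ys heq hlt ih =>
    rw [diffLoop, if_neg heq, if_pos hlt, bcWalk, if_neg heq, if_pos hlt]
    simpa using ih
  | case3 x xs y ys heq hlt ih =>
    rw [diffLoop, if_neg heq, if_neg hlt, bcWalk, if_neg heq, if_neg hlt]
    simp [ih]
  | case4 xs ys hne =>
    rw [bcWalk_base hne]
    rcases xs with _ | ⟨x, xs⟩
    · rw [diffLoop.eq_def]; rcases ys <;> rfl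
    · rcases ys with _ | ⟨y, ys⟩
      · rw [diffLoop.eq_def]; rcases xs <;> rfl
      · exact (hne x xs y ys rfl rfl).elim

-- ===== VERDICT (by name: the statement is the Claim_ definition above) =====
theorem boolean_calculate_spec : Claim_equal_boolean_calculate := by
  intro ids1 ids2 operator _
  unfold Spec_boolean_calculate boolean_calculate boolean_calculate_alt
  by_cases hA : operator = "AND"
  · simp only [if_pos hA]
    exact andLoop_eq_walk ids1 ids2
  · by_cases hO : operator = "OR"
    · simp only [if_neg hA, if_pos hO]
      exact orLoop_eq_walk ids1 ids2
    · simp only [if_neg hA, if_neg hO]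
      exact diffLoop_eq_walk ids1 ids2
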